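-- pv_equiv track=rewrite | github.com/brianstm/NUS | CS1010E/PE2/2021 S1/Question1.py | extract_parentheses_R
-- ===== SOURCE A (Python) =====
-- def extract_parentheses_R(stmt):
--     if len(stmt) == 0:
--         return stmt
--     else:
--         if stmt[0] == '(' or stmt[0] == ')':
--             return stmt[0] + extract_parentheses_R(stmt[1:])
--         else:
--             return extract_parentheses_R(stmt[1:])
-- ===== SOURCE B (Python) =====
-- def extract_parentheses_R(stmt):
--     result = stmt[:0]
--     for c in stmt:
--         if c == '(' or c == ')':
--             result += c
--     return result
-- ===== Notes on version B (the rewrite author's own statement) =====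
-- stated objective: faster
-- what changed: Replaced the O(n^2) recursion with repeated slicing/concatenation by a single iterative pass that appends matching characters to an accumulator.
import Mathlib
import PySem

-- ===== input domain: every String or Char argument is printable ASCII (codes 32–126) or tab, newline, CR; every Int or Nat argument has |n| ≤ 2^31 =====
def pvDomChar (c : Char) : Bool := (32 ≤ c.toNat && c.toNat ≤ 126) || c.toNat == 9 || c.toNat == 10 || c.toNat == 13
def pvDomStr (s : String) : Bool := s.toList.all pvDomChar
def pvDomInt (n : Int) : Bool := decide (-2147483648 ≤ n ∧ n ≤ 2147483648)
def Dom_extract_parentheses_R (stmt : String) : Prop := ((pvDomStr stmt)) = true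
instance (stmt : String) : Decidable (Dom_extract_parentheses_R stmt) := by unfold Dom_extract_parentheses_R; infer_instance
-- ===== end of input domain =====

-- B replaces A's O(n^2) slicing recursion by a single iterative filtering pass with an accumulator.

-- ===== PORT A =====
-- A's recursion: empty → stmt; head is '(' or ')' → head ++ recurse on tail; else recurse on tail.
def extract_parentheses_R_go (cs : List Char) : List Char :=
  match cs with
  | [] => []
  | c :: rest =>
      if c = '(' ∨ c = ')' then c :: extract_parentheses_R_go rest
      else extract_parentheses_R_go rest

def extract_parentheses_R (stmt : String) : String :=
  String.mk (extract_parentheses_R_go stmt.toList)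

-- ===== PORT B =====
-- B's loop: result starts empty; each matching character is appended to the accumulator.
def extract_parentheses_R_alt (stmt : String) : String :=
  String.mk (stmt.toList.foldl
    (fun result c => if c = '(' ∨ c = ')' then result ++ [c] else result) [])

-- ===== PRECONDITION & SPEC =====
def Spec_extract_parentheses_R (stmt : String) (out : String) : Prop := out = extract_parentheses_R_alt stmt
instance (stmt : String) (out : String) : Decidable (Spec_extract_parentheses_R stmt out) := by unfold Spec_extract_parentheses_R; infer_instance

-- ===== CLAIM (what is proved, stated in full; the proofs are below) =====
def Claim_equal_extract_parentheses_R : Prop := ∀ (stmt : String), Dom_extract_parentheses_R stmt → Spec_extract_parentheses_R stmt (extract_parentheses_R stmt)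

-- ===== LEMMAS AND PROOFS =====
theorem extract_parentheses_foldl_acc (cs : List Char) (acc : List Char) :
    cs.foldl (fun result c => if c = '(' ∨ c = ')' then result ++ [c] else result) acc
      = acc ++ extract_parentheses_R_go cs := by
  induction cs generalizing acc with
  | nil => simp [extract_parentheses_R_go]
  | cons c rest ih =>
      simp only [List.foldl, extract_parentheses_R_go]
      split_ifs with h <;> simp [ih]

-- ===== VERDICT (by name: the statement is the Claim_ definition above) =====
theorem extract_parentheses_R_spec : Claim_equal_extract_parentheses_R := by
  intro stmt _
  unfold Spec_extract_parentheses_R extract_parentheses_R extract_parentheses_R_alt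
  rw [extract_parentheses_foldl_acc]
  simp
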